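-- pv_equiv track=rewrite | github.com/fhill2/cm3065_final | ex2/cm3065/exercise2.py | linear_predict_order_2_encode
-- ===== SOURCE A (Python) =====
-- def linear_predict_order_2_encode(samples: list[int]) -> list[int]:
--     """Linear prediction: predict as 2*prev - prev_prev"""
--     if len(samples) < 2:
--         return samples[:]
--
--     residuals = samples[:2]  # Store first two as-is
--     for i in range(2, len(samples)):
--         predicted = 2 * samples[i-1] - samples[i-2]
--         residual = samples[i] - predicted
--         residuals.append(residual)
--     return residuals
-- ===== SOURCE B (Python) =====
-- def linear_predict_order_2_encode(samples: list[int]) -> list[int]: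
--     """Two-pass variant: first differences, then differences of differences."""
--     if len(samples) < 2:
--         return samples[:]
--     delta = [samples[i] - samples[i - 1] for i in range(1, len(samples))]
--     residuals = samples[:2]
--     for i in range(1, len(delta)):
--         residuals.append(delta[i] - delta[i - 1])
--     return residuals
-- ===== Notes on version B (the rewrite author's own statement) =====
-- stated objective: alternative
-- what changed: Replaces the single indexed loop computing samples[i]-(2*samples[i-1]-samples[i-2]) by two passes: a first-difference list is built once, and residuals are then differences of consecutive first differences.
import Mathlib
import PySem

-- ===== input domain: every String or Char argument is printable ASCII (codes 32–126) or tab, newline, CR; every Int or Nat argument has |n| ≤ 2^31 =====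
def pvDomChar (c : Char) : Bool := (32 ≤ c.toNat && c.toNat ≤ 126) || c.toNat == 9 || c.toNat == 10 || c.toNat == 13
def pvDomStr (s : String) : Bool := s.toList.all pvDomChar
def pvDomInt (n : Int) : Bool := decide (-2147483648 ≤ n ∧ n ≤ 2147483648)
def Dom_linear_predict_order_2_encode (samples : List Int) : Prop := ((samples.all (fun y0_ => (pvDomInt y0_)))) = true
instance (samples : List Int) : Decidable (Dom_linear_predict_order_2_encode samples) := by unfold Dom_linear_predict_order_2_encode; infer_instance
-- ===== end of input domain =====

-- B replaces the single indexed residual loop by two passes (a first-difference list, then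
-- differences of consecutive first differences) — an alternative decomposition, same cost.

-- ===== PORT A =====
def linear_predict_order_2_encode (samples : List Int) : List Int :=
  if samples.length < 2 then samples
  else
    (PySem.List.pyRange 2 (PySem.List.len samples) 1).foldl
      (fun acc i =>
        acc ++ [PySem.List.pyGetD samples i 0 -
          (2 * PySem.List.pyGetD samples (i - 1) 0 - PySem.List.pyGetD samples (i - 2) 0)])
      (samples.take 2)

-- ===== PORT B =====
def linear_predict_order_2_encode_alt (samples : List Int) : List Int :=
  if samples.length < 2 then samples
  else
    let delta := (PySem.List.pyRange 1 (PySem.List.len samples) 1).map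
      (fun i => PySem.List.pyGetD samples i 0 - PySem.List.pyGetD samples (i - 1) 0)
    (PySem.List.pyRange 1 (PySem.List.len delta) 1).foldl
      (fun acc i => acc ++ [PySem.List.pyGetD delta i 0 - PySem.List.pyGetD delta (i - 1) 0])
      (samples.take 2)

-- ===== PRECONDITION & SPEC =====
def Spec_linear_predict_order_2_encode (samples : List Int) (out : List Int) : Prop := out = linear_predict_order_2_encode_alt samples
instance (samples : List Int) (out : List Int) : Decidable (Spec_linear_predict_order_2_encode samples out) := by unfold Spec_linear_predict_order_2_encode; infer_instance

-- ===== CLAIM (what is proved, stated in full; the proofs are below) =====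
def Claim_equal_linear_predict_order_2_encode : Prop := ∀ (samples : List Int), Dom_linear_predict_order_2_encode samples → Spec_linear_predict_order_2_encode samples (linear_predict_order_2_encode samples)

-- ===== LEMMAS AND PROOFS =====

lemma ports_eq (samples : List Int) :
    linear_predict_order_2_encode samples = linear_predict_order_2_encode_alt samples := by
  unfold linear_predict_order_2_encode linear_predict_order_2_encode_alt
  by_cases h : samples.length < 2
  · simp [h]
  · rw [if_neg h, if_neg h]
    push Not at h
    rw [PySem.List.foldl_append_singleton_eq_map, PySem.List.foldl_append_singleton_eq_map]
    congr 1
    have hL : PySem.List.len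
        (List.map (fun i => PySem.List.pyGetD samples i 0 - PySem.List.pyGetD samples (i - 1) 0)
          (PySem.List.pyRange 1 (PySem.List.len samples))) = (samples.length : Int) - 1 := by
      simp [PySem.List.len_eq, PySem.List.length_pyRange_one]
      omega
    rw [hL]
    rw [PySem.List.pyRange_one 2 (PySem.List.len samples),
        PySem.List.pyRange_one 1 ((samples.length : Int) - 1)]
    have : ((samples.length : Int) - 1 - 1).toNat = ((PySem.List.len samples : Int) - 2).toNat := by
      simp [PySem.List.len_eq]; omega
    rw [this]
    simp only [List.map_map]
    apply List.map_congr_left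
    intro k hk
    simp only [List.mem_range, PySem.List.len_eq] at hk
    simp only [Function.comp]
    have e1 : (1:Int) + (k:Int) = ((k+1 : Nat) : Int) := by push_cast; ring
    have e2 : (1:Int) + (k:Int) - 1 = ((k : Nat) : Int) := by ring
    rw [e2, e1,
        PySem.List.pyGetD_map_pyRange_one _ 1 (PySem.List.len samples) (k+1) 0
          (by simp [PySem.List.len_eq]; omega),
        PySem.List.pyGetD_map_pyRange_one _ 1 (PySem.List.len samples) k 0
          (by simp [PySem.List.len_eq]; omega)]
    have g : ∀ (i : Int) (m : Nat), i = (m : Int) →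
        PySem.List.pyGetD samples i 0 = samples.getD m 0 := by
      intro i m hi; rw [hi, PySem.List.pyGetD_natCast]
    rw [g (2+((k : Nat) : Int)) (k+2) (by push_cast; ring),
        g (2+((k : Nat) : Int)-1) (k+1) (by push_cast; ring),
        g (2+((k : Nat) : Int)-2) k (by ring),
        g (1+((k+1 : Nat) : Int)) (k+2) (by push_cast; ring),
        g (1+((k+1 : Nat) : Int)-1) (k+1) (by push_cast; ring),
        g (1+((k : Nat) : Int)) (k+1) (by push_cast; ring),
        g (1+((k : Nat) : Int)-1) k (by ring)]
    ring

-- ===== VERDICT (by name: the statement is the Claim_ definition above) =====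
theorem linear_predict_order_2_encode_spec : Claim_equal_linear_predict_order_2_encode := by
  intro samples _
  unfold Spec_linear_predict_order_2_encode
  exact ports_eq samples
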